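-- pv_equiv track=rewrite | github.com/AxelAcep/Balansing-Model | dds.py | calculate_dds
-- ===== SOURCE A (Python) =====
-- def calculate_dds(detected_labels: list) -> int:
--     dds_categories = [
--         "makanan_berpati",
--         "daging",
--         "telur",
--         "produk_susu",
--         "kacang_legume",
--         "buah_sayur_vitA",
--         "buah_sayur_lainnya"
--     ]
--     return len(set(item for item in detected_labels if item in dds_categories))
-- ===== SOURCE B (Python) =====
-- def calculate_dds(detected_labels: list) -> int:
--     dds_categories = [
--         "makanan_berpati",
--         "daging",
--         "telur",
--         "produk_susu",
--         "kacang_legume",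
--         "buah_sayur_vitA",
--         "buah_sayur_lainnya"
--     ]
--     return sum(1 for cat in dds_categories if cat in detected_labels)
-- ===== Notes on version B (the rewrite author's own statement) =====
-- stated objective: alternative
-- what changed: Instead of filtering the input and deduplicating it through a set, B probes each of the seven fixed categories for membership in the input and sums the hits; no set is built.
import Mathlib
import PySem

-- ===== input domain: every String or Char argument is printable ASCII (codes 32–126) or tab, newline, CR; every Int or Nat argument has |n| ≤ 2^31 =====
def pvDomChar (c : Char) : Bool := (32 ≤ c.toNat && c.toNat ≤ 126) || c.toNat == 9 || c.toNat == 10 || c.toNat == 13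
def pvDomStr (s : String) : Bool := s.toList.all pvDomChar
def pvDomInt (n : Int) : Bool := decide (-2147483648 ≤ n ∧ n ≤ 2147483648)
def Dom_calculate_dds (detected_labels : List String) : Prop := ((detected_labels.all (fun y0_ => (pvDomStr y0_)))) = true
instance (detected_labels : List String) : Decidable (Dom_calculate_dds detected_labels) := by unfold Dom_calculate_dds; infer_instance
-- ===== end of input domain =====

-- B counts, over the seven fixed categories, how many occur in the input,
-- instead of A's filter-the-input-then-deduplicate-through-a-set; alternative decomposition, same result.


def pvCats : List String :=
  ["makanan_berpati", "daging", "telur", "produk_susu",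
   "kacang_legume", "buah_sayur_vitA", "buah_sayur_lainnya"]

-- ===== PORT A =====
-- len(set(item for item in detected_labels if item in dds_categories))
def calculate_dds (detected_labels : List String) : Int :=
  ((PySem.Set.ofList (detected_labels.filter (fun item => pvCats.contains item))).length : Int)

-- ===== PORT B =====
-- sum(1 for cat in dds_categories if cat in detected_labels)
def calculate_dds_alt (detected_labels : List String) : Int :=
  pvCats.foldl (fun acc cat => if detected_labels.contains cat then acc + 1 else acc) 0

-- ===== PRECONDITION & SPEC =====
def Spec_calculate_dds (detected_labels : List String) (out : Int) : Prop := out = calculate_dds_alt detected_labels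
instance (detected_labels : List String) (out : Int) : Decidable (Spec_calculate_dds detected_labels out) := by unfold Spec_calculate_dds; infer_instance

-- ===== CLAIM (what is proved, stated in full; the proofs are below) =====
def Claim_equal_calculate_dds : Prop := ∀ (detected_labels : List String), Dom_calculate_dds detected_labels → Spec_calculate_dds detected_labels (calculate_dds detected_labels)

-- ===== LEMMAS AND PROOFS =====

-- B's counting fold is the length of the filtered category list.
theorem foldl_count_eq (xs : List String) (p : String → Bool) (a : Int) :
    xs.foldl (fun acc x => if p x then acc + 1 else acc) a = a + ((xs.filter p).length : Int) := by
  induction xs generalizing a with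
  | nil => simp
  | cons x xs ih =>
    by_cases hp : p x = true
    · simp [List.foldl_cons, hp, ih]; ring
    · simp only [List.foldl_cons, List.filter_cons, hp]
      simp only [Bool.false_eq_true, if_false, ih]

-- A's deduplicated filtered input and B's filtered category list have the same members,
-- and both are duplicate-free, hence equal length.
theorem set_len_eq (detected_labels : List String) :
    (PySem.Set.ofList (detected_labels.filter (fun item => pvCats.contains item))).length
      = (pvCats.filter (fun cat => detected_labels.contains cat)).length := by
  apply List.Perm.length_eq
  rw [List.perm_ext_iff_of_nodup (PySem.Set.nodup_ofList _) (List.Nodup.filter _ (by unfold pvCats; decide))]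
  intro a
  simp only [PySem.Set.mem_ofList, List.mem_filter, List.contains_iff_mem]
  exact and_comm

-- ===== VERDICT (by name: the statement is the Claim_ definition above) =====
theorem calculate_dds_spec : Claim_equal_calculate_dds := by
  intro detected_labels _
  unfold Spec_calculate_dds calculate_dds calculate_dds_alt
  rw [foldl_count_eq, set_len_eq, zero_add]
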